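-- pv_equiv track=rewrite | github.com/MrSusanovo/TRASH | BlackJackAnalysis/betting.py | JudgeSeq
-- ===== SOURCE A (Python) =====
-- def Judge(a,b):
--     if b == 14:
--         return 'J'
--     elif a > b:
--         return 'S'
--     elif a < b:
--         return 'L'
--     else:
--         return 'T'
--
-- def JudgeSeq(s):
--     res = []
--     if len(s) > 0:
--         head = s[0]
--         for i in range(1,len(s)):
--             res.append(Judge(head,s[i]))
--             if s[i] != 14:
--                 head = s[i]
--     return res
-- ===== SOURCE B (Python) =====
-- def JudgeSeq(s):
--     # Fill the whole output with 'J', then scatter comparison labels at the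
--     # positions of non-14 cards by zipping consecutive "anchor" indices
--     # (index 0 plus every later non-14 index) -- no running-state accumulator.
--     res = ['J'] * max(len(s) - 1, 0)
--     idxs = [0] + [i for i in range(1, len(s)) if s[i] != 14]
--     for p, q in zip(idxs, idxs[1:]):
--         res[q - 1] = 'S' if s[p] > s[q] else 'L' if s[p] < s[q] else 'T'
--     return res
-- ===== Notes on version B (the rewrite author's own statement) =====
-- stated objective: alternative
-- what changed: B fills the whole output with 'J' and then scatter-writes comparison labels at the positions of non-14 elements by zipping consecutive anchor indices (0 plus each non-14 index), eliminating A's running last-non-14 accumulator and its per-step state update.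
import Mathlib
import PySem

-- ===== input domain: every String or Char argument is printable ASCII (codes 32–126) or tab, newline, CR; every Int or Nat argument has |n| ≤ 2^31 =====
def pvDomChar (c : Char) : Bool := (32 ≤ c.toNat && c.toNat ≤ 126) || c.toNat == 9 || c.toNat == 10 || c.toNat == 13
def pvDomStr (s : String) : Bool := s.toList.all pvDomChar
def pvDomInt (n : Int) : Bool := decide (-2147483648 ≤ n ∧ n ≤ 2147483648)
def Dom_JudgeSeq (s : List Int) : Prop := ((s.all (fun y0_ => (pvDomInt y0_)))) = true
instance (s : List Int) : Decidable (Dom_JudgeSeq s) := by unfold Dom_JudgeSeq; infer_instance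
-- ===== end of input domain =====

-- B replaces A's running last-non-14 accumulator by a fill-then-scatter pass over anchor
-- indices (alternative decomposition, same O(n) cost); same value on every input.

-- ===== PORT A =====
def Judge (a b : Int) : String :=
  if b = 14 then "J"
  else if a > b then "S"
  else if a < b then "L"
  else "T"

def JudgeSeq (s : List Int) : List String :=
  let res : List String := []
  if s.length > 0 then
    let head := PySem.List.pyGetD s 0 0
    let st := (PySem.List.pyRange 1 (s.length : Int) 1).foldl
      (fun (st : List String × Int) i =>
        let x := PySem.List.pyGetD s i 0
        (st.1 ++ [Judge st.2 x], if x ≠ 14 then x else st.2)) (res, head)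
    st.1
  else res

-- ===== PORT B =====
def JudgeSeq_alt (s : List Int) : List String :=
  -- ['J'] * max(len(s)-1, 0): Nat subtraction is exactly max(len(s)-1, 0)
  let res := List.replicate (s.length - 1) "J"
  -- range(1, len(s)) is List.range' 1 (len(s)-1); every index i used satisfies
  -- 0 ≤ i < len(s), so Python's s[i] is exactly List.getD s i 0
  let idxs := 0 :: (List.range' 1 (s.length - 1)).filter (fun i => s.getD i 0 ≠ 14)
  (idxs.zip idxs.tail).foldl
    (fun r pq =>
      r.set (pq.2 - 1)
        (if s.getD pq.1 0 > s.getD pq.2 0 then "S"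
         else if s.getD pq.1 0 < s.getD pq.2 0 then "L" else "T"))
    res

-- ===== PRECONDITION & SPEC =====
def Spec_JudgeSeq (s : List Int) (out : List String) : Prop := out = JudgeSeq_alt s
instance (s : List Int) (out : List String) : Decidable (Spec_JudgeSeq s out) := by unfold Spec_JudgeSeq; infer_instance

-- ===== CLAIM (what is proved, stated in full; the proofs are below) =====
def Claim_equal_JudgeSeq : Prop := ∀ (s : List Int), Dom_JudgeSeq s → Spec_JudgeSeq s (JudgeSeq s)

-- ===== LEMMAS AND PROOFS =====

-- the label of one judged position: pair (last non-14 value before it, value here)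
def f2 (hx : Int × Int) : String :=
  if hx.2 = 14 then "J" else if hx.1 > hx.2 then "S" else if hx.1 < hx.2 then "L" else "T"

-- running "last non-14" table (tail part), used only to CHARACTERISE both ports
def accumHeads (prev : Int) : List Int → List Int
  | [] => []
  | x :: xs => (if x ≠ 14 then x else prev) :: accumHeads (if x ≠ 14 then x else prev) xs

def headsOf : List Int → List Int
  | [] => []
  | x :: xs => x :: accumHeads x xs

-- the common closed form both ports are proved equal to
def M (s : List Int) : List String := ((headsOf s).zip (s.drop 1)).map f2

def lastHead (s : List Int) : Int := (headsOf s).getLastD 0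

-- B's anchor indices after 0, and its scatter value at a pair of anchors
def qsOf (s : List Int) : List Nat :=
  (List.range' 1 (s.length - 1)).filter (fun i => s.getD i 0 ≠ 14)

def vOf (s : List Int) (pq : Nat × Nat) : String :=
  if s.getD pq.1 0 > s.getD pq.2 0 then "S"
  else if s.getD pq.1 0 < s.getD pq.2 0 then "L" else "T"

-- consecutive pairs of a chain p :: qs
def cp : Nat → List Nat → List (Nat × Nat)
  | _, [] => []
  | p, q :: qs => (p, q) :: cp q qs

lemma judge_eq (a b : Int) :
    Judge a b = (if b = 14 then "J" else if a > b then "S" else if a < b then "L" else "T") := rfl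

lemma loop_eq (tail : List Int) (prev : Int) (acc : List String) :
    (tail.foldl
      (fun (st : List String × Int) x =>
        (st.1 ++ [Judge st.2 x], if x ≠ 14 then x else st.2)) (acc, prev)).1
    = acc ++ ((prev :: accumHeads prev tail).zip tail).map f2 := by
  induction tail generalizing prev acc with
  | nil => simp
  | cons y ys ih =>
      simp only [List.foldl_cons, accumHeads, List.zip_cons_cons, List.map_cons]
      rw [ih]
      simp [judge_eq, f2, List.append_assoc]

lemma A_eq_M (s : List Int) : JudgeSeq s = M s := by
  cases s with
  | nil => rfl
  | cons x xs =>
      unfold JudgeSeq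
      rw [if_pos (by simp)]
      have hr := PySem.List.foldl_pyRange_pyGetD (xs := x :: xs) (a := 1) (d := 0)
        (f := fun (st : List String × Int) x =>
          (st.1 ++ [Judge st.2 x], if x ≠ 14 then x else st.2))
        (init := (([] : List String), PySem.List.pyGetD (x :: xs) 0 0)) (by omega)
      simp only [PySem.List.len_eq] at hr
      show (List.foldl
        (fun (st : List String × Int) i =>
          (st.1 ++ [Judge st.2 (PySem.List.pyGetD (x :: xs) i 0)],
            if PySem.List.pyGetD (x :: xs) i 0 ≠ 14 then PySem.List.pyGetD (x :: xs) i 0 else st.2))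
        ([], PySem.List.pyGetD (x :: xs) 0 0)
        (PySem.List.pyRange 1 ((x :: xs).length : Int) 1)).1 = _
      rw [hr, loop_eq]
      simp [M, headsOf, PySem.List.pyGetD, PySem.List.pyGet?, PySem.List.pyIdx?]

lemma zip_tail_cp (p : Nat) (qs : List Nat) : (p :: qs).zip qs = cp p qs := by
  induction qs generalizing p with
  | nil => rfl
  | cons q qs ih => simp [cp, List.zip_cons_cons, ih]

lemma B_eq_fold (s : List Int) :
    JudgeSeq_alt s
      = (cp 0 (qsOf s)).foldl (fun r pq => r.set (pq.2 - 1) (vOf s pq))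
          (List.replicate (s.length - 1) "J") := by
  show (((0 :: qsOf s).zip (0 :: qsOf s).tail).foldl
      (fun r pq => r.set (pq.2 - 1) (vOf s pq)) (List.replicate (s.length - 1) "J")) = _
  rw [List.tail_cons, zip_tail_cp]

lemma cp_concat (qs : List Nat) (p q : Nat) :
    cp p (qs ++ [q]) = cp p qs ++ [(qs.getLastD p, q)] := by
  induction qs generalizing p with
  | nil => rfl
  | cons a l ih => simp only [List.cons_append, cp, ih, List.getLastD_cons]

lemma mem_cp (qs : List Nat) : ∀ (p : Nat) (pq : Nat × Nat), pq ∈ cp p qs →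
    (pq.1 = p ∨ pq.1 ∈ qs) ∧ pq.2 ∈ qs := by
  induction qs with
  | nil => intro p pq h; simp [cp] at h
  | cons q l ih =>
      intro p pq h
      simp only [cp, List.mem_cons] at h
      rcases h with h | h
      · subst h; simp
      · rcases ih q pq h with ⟨h1, h2⟩
        refine ⟨?_, by simp [h2]⟩
        rcases h1 with h1 | h1 <;> simp [h1]

lemma mem_qsOf {s : List Int} {q : Nat} (h : q ∈ qsOf s) :
    1 ≤ q ∧ q < s.length ∧ s.getD q 0 ≠ 14 := by
  unfold qsOf at h
  rw [List.mem_filter] at h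
  rcases h with ⟨hr, hp⟩
  rw [List.mem_range'] at hr
  refine ⟨by omega, by omega, by simpa using hp⟩

lemma fold_set_append (v : Nat × Nat → String) (pairs : List (Nat × Nat))
    (r : List String) (a : String) (h : ∀ pq ∈ pairs, pq.2 - 1 < r.length) :
    pairs.foldl (fun r pq => r.set (pq.2 - 1) (v pq)) (r ++ [a])
      = pairs.foldl (fun r pq => r.set (pq.2 - 1) (v pq)) r ++ [a] := by
  induction pairs generalizing r with
  | nil => rfl
  | cons pq l ih =>
      simp only [List.foldl_cons]
      rw [List.set_append, if_pos (h pq (by simp))]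
      rw [ih (r.set (pq.2 - 1) (v pq)) (by simpa using fun x hx => h x (by simp [hx]))]

lemma getD_concat_left (s : List Int) (y : Int) (i : Nat) (h : i < s.length) :
    (s ++ [y]).getD i 0 = s.getD i 0 := by
  rw [List.getD_eq_getElem?_getD, List.getD_eq_getElem?_getD, List.getElem?_append_left h]

lemma getD_concat_self (s : List Int) (y : Int) :
    (s ++ [y]).getD s.length 0 = y := by
  rw [List.getD_eq_getElem?_getD]
  simp

lemma qsOf_concat (s : List Int) (y : Int) (h : s ≠ []) :
    qsOf (s ++ [y]) = qsOf s ++ (if y = 14 then [] else [s.length]) := by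
  unfold qsOf
  have hn : s.length - 1 + 1 = s.length := by
    cases s with | nil => simp at h | cons a l => simp
  have hr : List.range' 1 ((s ++ [y]).length - 1)
      = List.range' 1 (s.length - 1) ++ [s.length] := by
    rw [show (s ++ [y]).length - 1 = (s.length - 1) + 1 by simp [hn]]
    rw [List.range'_concat]
    congr 1
    have : 1 ≤ s.length := by cases s with | nil => simp at h | cons a l => simp
    simp
    omega
  rw [hr, List.filter_append]
  congr 1
  · apply List.filter_congr
    intro i hi
    rw [List.mem_range'] at hi
    rw [getD_concat_left s y i (by omega)]
  · simp only [List.filter_cons, List.filter_nil]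
    rw [getD_concat_self]
    by_cases hy : y = 14 <;> simp [hy]

lemma accumHeads_length (prev : Int) (l : List Int) : (accumHeads prev l).length = l.length := by
  induction l generalizing prev with
  | nil => rfl
  | cons x xs ih => simp [accumHeads, ih]

lemma headsOf_length (s : List Int) : (headsOf s).length = s.length := by
  cases s with
  | nil => rfl
  | cons x xs => simp [headsOf, accumHeads_length]

lemma accumHeads_concat (prev : Int) (l : List Int) (y : Int) :
    accumHeads prev (l ++ [y])
      = accumHeads prev l
        ++ [if y = 14 then (accumHeads prev l).getLastD prev else y] := by
  induction l generalizing prev with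
  | nil => by_cases hy : y = 14 <;> simp [accumHeads, hy]
  | cons x xs ih => simp only [List.cons_append, accumHeads, ih, List.getLastD_cons]

lemma headsOf_concat (s : List Int) (y : Int) (h : s ≠ []) :
    headsOf (s ++ [y]) = headsOf s ++ [if y = 14 then lastHead s else y] := by
  cases s with
  | nil => simp at h
  | cons x xs =>
      simp only [headsOf, List.cons_append, accumHeads_concat, lastHead, List.getLastD_cons]

lemma M_length (s : List Int) : (M s).length = s.length - 1 := by
  simp [M, headsOf_length]

lemma zip_concat_left {a b : Type} (A : List a) (x : a) (t : List b)
    (h : A.length = t.length) : (A ++ [x]).zip t = A.zip t := by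
  calc (A ++ [x]).zip t = (A ++ [x]).zip (t ++ []) := by simp
    _ = A.zip t ++ ([x].zip ([] : List b)) := List.zip_append h
    _ = A.zip t := by simp

lemma M_concat (s : List Int) (y : Int) (h : s ≠ []) :
    M (s ++ [y]) = M s ++ [f2 (lastHead s, y)] := by
  have hd : (s ++ [y]).drop 1 = s.drop 1 ++ [y] := by
    cases s with | nil => simp at h | cons a l => simp
  rcases (headsOf s).eq_nil_or_concat with hH | ⟨A0, hl, hH⟩
  · exfalso
    cases s with | nil => simp at h | cons a l => simp [headsOf] at hH
  · rw [List.concat_eq_append] at hH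
    have hlast : lastHead s = hl := by rw [lastHead, hH, List.getLastD_concat]
    have hlen : A0.length = (s.drop 1).length := by
      have hx := headsOf_length s
      rw [hH] at hx
      simp only [List.length_append, List.length_cons, List.length_nil] at hx
      have h1 : 1 ≤ s.length := by cases s with | nil => simp at h | cons a l => simp
      simp only [List.length_drop]
      omega
    unfold M
    rw [headsOf_concat s y h, hd, hH, hlast, List.append_assoc, List.zip_append hlen]
    rw [zip_concat_left A0 hl _ hlen]
    simp

lemma qs_last_lt (s : List Int) (h : s ≠ []) : (qsOf s).getLastD 0 < s.length := by
  rcases hq : (qsOf s).getLast? with _ | q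
  · rw [List.getLastD_eq_getLast?, hq]
    cases s with | nil => simp at h | cons a l => simp
  · rw [List.getLastD_eq_getLast?, hq]
    have : q ∈ qsOf s := List.mem_of_getLast? hq
    exact (mem_qsOf this).2.1

-- the joint induction: B equals the closed form, and the last anchor's value is lastHead
lemma B_main (s : List Int) :
    JudgeSeq_alt s = M s ∧ (s ≠ [] → s.getD ((qsOf s).getLastD 0) 0 = lastHead s) := by
  induction s using List.reverseRecOn with
  | nil => exact ⟨rfl, fun h => absurd rfl h⟩
  | append_singleton s y ih =>
      by_cases hs : s = []
      · subst hs
        constructor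
        · rfl
        · intro _
          simp [qsOf, lastHead, headsOf, accumHeads]
      · rcases ih with ⟨ihB, ihInv⟩
        have hInv := ihInv hs
        have hn1 : 1 ≤ s.length := by cases s with | nil => simp at hs | cons a l => simp
        have hlt := qs_last_lt s hs
        have hbound : ∀ pq ∈ cp 0 (qsOf s), pq.2 - 1 < s.length - 1 := by
          intro pq hm
          have h2 := (mem_cp _ _ _ hm).2
          have := mem_qsOf h2
          omega
        have hcongr : ∀ (r : List String), ∀ pq ∈ cp 0 (qsOf s),
            r.set (pq.2 - 1) (vOf (s ++ [y]) pq) = r.set (pq.2 - 1) (vOf s pq) := by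
          intro r pq hm
          rcases mem_cp _ _ _ hm with ⟨h1, h2⟩
          have hq2 := mem_qsOf h2
          have e2 : (s ++ [y]).getD pq.2 0 = s.getD pq.2 0 :=
            getD_concat_left s y _ (by omega)
          have e1 : (s ++ [y]).getD pq.1 0 = s.getD pq.1 0 := by
            rcases h1 with h1 | h1
            · rw [h1]; exact getD_concat_left s y _ (by omega)
            · have := mem_qsOf h1
              exact getD_concat_left s y _ (by omega)
          simp only [vOf, e1, e2]
        have hrep : List.replicate ((s ++ [y]).length - 1) "J"
            = List.replicate (s.length - 1) "J" ++ ["J"] := by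
          rw [show (s ++ [y]).length - 1 = (s.length - 1) + 1 by simp; omega]
          exact List.replicate_succ' ..
        have hpref : (cp 0 (qsOf s)).foldl
              (fun r pq => r.set (pq.2 - 1) (vOf (s ++ [y]) pq))
              (List.replicate (s.length - 1) "J" ++ ["J"])
            = M s ++ ["J"] := by
          rw [PySem.List.foldl_congr_mem _ _ _ _ (fun r pq hm => hcongr r pq hm)]
          rw [fold_set_append _ _ _ _ (by simpa using hbound)]
          rw [← B_eq_fold, ihB]
        by_cases hy : y = 14
        · constructor
          · rw [B_eq_fold, qsOf_concat s y hs, if_pos hy, List.append_nil, hrep, hpref]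
            rw [M_concat s y hs]
            simp [f2, hy]
          · intro _
            rw [qsOf_concat s y hs, if_pos hy, List.append_nil]
            have e : (s ++ [y]).getD ((qsOf s).getLastD 0) 0 = s.getD ((qsOf s).getLastD 0) 0 :=
              getD_concat_left s y _ hlt
            rw [e, hInv]
            unfold lastHead
            rw [headsOf_concat s y hs, if_pos hy]
            simp [lastHead]
        · have hqs' : qsOf (s ++ [y]) = qsOf s ++ [s.length] := by
            rw [qsOf_concat s y hs, if_neg hy]
          constructor
          · rw [B_eq_fold, hqs', cp_concat, List.foldl_concat, hrep, hpref]
            have hlen : (M s).length = s.length - 1 := M_length s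
            have hset : (M s ++ ["J"]).set (s.length - 1)
                  (vOf (s ++ [y]) ((qsOf s).getLastD 0, s.length))
                = M s ++ [vOf (s ++ [y]) ((qsOf s).getLastD 0, s.length)] := by
              rw [← hlen, List.set_append, if_neg (by omega)]
              simp
            have e1 : (s ++ [y]).getD ((qsOf s).getLastD 0) 0 = lastHead s := by
              rw [getD_concat_left s y _ hlt, hInv]
            have e2 : (s ++ [y]).getD s.length 0 = y := getD_concat_self s y
            have ev : vOf (s ++ [y]) ((qsOf s).getLastD 0, s.length) = f2 (lastHead s, y) := by
              show (if (s ++ [y]).getD ((qsOf s).getLastD 0) 0 > (s ++ [y]).getD s.length 0 then "S"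
                else if (s ++ [y]).getD ((qsOf s).getLastD 0) 0 < (s ++ [y]).getD s.length 0 then "L"
                else "T") = _
              rw [e1, e2]
              simp [f2, hy]
            rw [hset, ev, M_concat s y hs]
          · intro _
            rw [hqs', List.getLastD_concat, getD_concat_self]
            unfold lastHead
            rw [headsOf_concat s y hs, if_neg hy, List.getLastD_concat]

-- ===== VERDICT (by name: the statement is the Claim_ definition above) =====
theorem JudgeSeq_spec : Claim_equal_JudgeSeq := by
  intro s _
  show JudgeSeq s = JudgeSeq_alt s
  rw [A_eq_M, (B_main s).1]
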